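-- pv_equiv track=rewrite | github.com/JKourelis/ipSAE_batch | ipsae_batch/extractors/contacts.py | _group_into_regions_with_gap_merge
-- ===== SOURCE A (Python) =====
-- from typing import Dict, List, Tuple, Optional
--
-- def _group_into_regions_with_gap_merge(
--     indices: List[int],
--     gap_threshold: int = 3
-- ) -> List[Tuple[int, int]]:
--     """
--     Group sorted indices into contiguous regions, merging small gaps.
--
--     This matches AlphaBridge's fix_intervals() behavior which merges
--     regions separated by gaps <= 3 residues.
--
--     Args:
--         indices: Sorted list of residue indices
--         gap_threshold: Maximum gap to merge (default 3, as in AlphaBridge)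
--
--     Returns:
--         List of (start, end) tuples
--     """
--     if not indices:
--         return []
--
--     regions = []
--     start = indices[0]
--     prev = indices[0]
--
--     for idx in indices[1:]:
--         if idx - prev > gap_threshold:
--             regions.append((start, prev))
--             start = idx
--         prev = idx
--     regions.append((start, prev))
--
--     return regions
-- ===== SOURCE B (Python) =====
-- def _group_into_regions_with_gap_merge(indices, gap_threshold=3):
--     if not indices:
--         return []
--     # pass 1: boolean breakpoint list over consecutive pairs
--     breaks = [b - a > gap_threshold for a, b in zip(indices, indices[1:])]
--     # pass 2: derive region starts and ends from the breakpoints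
--     starts = [indices[0]] + [x for x, brk in zip(indices[1:], breaks) if brk]
--     ends = [x for x, brk in zip(indices, breaks) if brk] + [indices[-1]]
--     return list(zip(starts, ends))
-- ===== Notes on version B (the rewrite author's own statement) =====
-- stated objective: alternative
-- what changed: Replaces A's single stateful accumulator loop (regions/start/prev updated as it walks) with a breakpoint-list decomposition: first compute the boolean list of gap breakpoints over consecutive pairs, then derive the starts and ends lists from it and zip them.
import Mathlib
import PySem

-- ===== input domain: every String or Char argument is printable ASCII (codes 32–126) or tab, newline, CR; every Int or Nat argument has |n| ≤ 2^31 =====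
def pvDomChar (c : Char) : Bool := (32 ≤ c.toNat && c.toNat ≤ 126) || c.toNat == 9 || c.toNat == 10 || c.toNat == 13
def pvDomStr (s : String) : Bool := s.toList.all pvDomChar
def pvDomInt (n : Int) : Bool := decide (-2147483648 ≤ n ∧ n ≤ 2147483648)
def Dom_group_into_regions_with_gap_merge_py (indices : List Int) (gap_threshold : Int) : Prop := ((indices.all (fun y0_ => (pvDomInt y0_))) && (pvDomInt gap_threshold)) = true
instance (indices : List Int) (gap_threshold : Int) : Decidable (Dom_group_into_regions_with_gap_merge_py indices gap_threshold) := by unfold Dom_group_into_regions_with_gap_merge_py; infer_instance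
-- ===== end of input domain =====

-- B replaces the stateful region-accumulating loop by a breakpoint-list decomposition (two passes: breaks, then starts/ends zipped); alternative structure, same O(n) cost.


-- ===== PORT A =====
-- stateful loop: (regions, start, prev), appending a region at each large gap
def group_into_regions_with_gap_merge_py (indices : List Int) (gap_threshold : Int) : List (Int × Int) :=
  match indices with
  | [] => []
  | h :: t =>
    let st := t.foldl
      (fun (st : List (Int × Int) × Int × Int) idx =>
        if idx - st.2.2 > gap_threshold then (st.1 ++ [(st.2.1, st.2.2)], idx, idx)
        else (st.1, st.2.1, idx))
      ([], h, h)
    st.1 ++ [(st.2.1, st.2.2)]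

-- ===== PORT B =====
-- B: breakpoint booleans over consecutive pairs, then starts/ends lists, then zip
def group_into_regions_with_gap_merge_py_alt (indices : List Int) (gap_threshold : Int) : List (Int × Int) :=
  match indices with
  | [] => []
  | h :: t =>
    let breaks := (List.zip (h :: t) t).map (fun p => decide (p.2 - p.1 > gap_threshold))
    let starts := h :: (((List.zip t breaks).filter (fun p => p.2)).map (fun p => p.1))
    let ends := (((List.zip (h :: t) breaks).filter (fun p => p.2)).map (fun p => p.1))
      ++ [(h :: t).getLast (by simp)]
    List.zip starts ends

-- ===== PRECONDITION & SPEC =====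
def Spec_group_into_regions_with_gap_merge_py (indices : List Int) (gap_threshold : Int) (out : List (Int × Int)) : Prop := out = group_into_regions_with_gap_merge_py_alt indices gap_threshold
instance (indices : List Int) (gap_threshold : Int) (out : List (Int × Int)) : Decidable (Spec_group_into_regions_with_gap_merge_py indices gap_threshold out) := by unfold Spec_group_into_regions_with_gap_merge_py; infer_instance

-- ===== CLAIM (what is proved, stated in full; the proofs are below) =====
def Claim_equal_group_into_regions_with_gap_merge_py : Prop := ∀ (indices : List Int) (gap_threshold : Int), Dom_group_into_regions_with_gap_merge_py indices gap_threshold → Spec_group_into_regions_with_gap_merge_py indices gap_threshold (group_into_regions_with_gap_merge_py indices gap_threshold)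

-- ===== LEMMAS AND PROOFS =====

-- common spec: first region's end and the remaining regions, given previous element and tail
def goB (gap : Int) : Int → List Int → Int × List (Int × Int)
  | p, [] => (p, [])
  | p, x :: xs =>
    let er := goB gap x xs
    if x - p > gap then (p, (x, er.1) :: er.2) else er

theorem foldA_eq (gap : Int) (t : List Int) : ∀ (acc : List (Int × Int)) (s p : Int),
    (let st := t.foldl
      (fun (st : List (Int × Int) × Int × Int) idx =>
        if idx - st.2.2 > gap then (st.1 ++ [(st.2.1, st.2.2)], idx, idx)
        else (st.1, st.2.1, idx))
      (acc, s, p)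
     st.1 ++ [(st.2.1, st.2.2)])
    = acc ++ (s, (goB gap p t).1) :: (goB gap p t).2 := by
  induction t with
  | nil => intro acc s p; simp [goB]
  | cons x xs ih =>
    intro acc s p
    simp only [List.foldl_cons, goB]
    by_cases h : x - p > gap
    · simp only [h, ih]
      simp
    · simp only [if_neg h, ih]

theorem zip_head_swap {S E : List Int} {x h e : Int} {r : List (Int × Int)}
    (hz : (x :: S).zip E = (x, e) :: r) : (h :: S).zip E = (h, e) :: r := by
  cases E with
  | nil => simp at hz
  | cons a l => simp_all

theorem altB_eq (gap : Int) (t : List Int) : ∀ (h : Int),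
    group_into_regions_with_gap_merge_py_alt (h :: t) gap
    = (h, (goB gap h t).1) :: (goB gap h t).2 := by
  induction t with
  | nil => intro h; simp [group_into_regions_with_gap_merge_py_alt, goB]
  | cons x xs ih =>
    intro h
    simp only [group_into_regions_with_gap_merge_py_alt, goB] at *
    by_cases hb : x - h > gap
    · simp only [List.zip] at *
      simp [hb, List.getLast_cons] at ih ⊢
      cases hx : goB gap x xs with
      | mk e r => specialize ih x; rw [hx] at ih; simp_all
    · simp only [List.zip] at *
      simp [hb, List.getLast_cons] at ih ⊢
      cases hx : goB gap x xs with
      | mk e r =>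
        specialize ih x; rw [hx] at ih
        exact zip_head_swap ih

-- ===== VERDICT (by name: the statement is the Claim_ definition above) =====
theorem group_into_regions_with_gap_merge_py_spec : Claim_equal_group_into_regions_with_gap_merge_py := by
  intro indices gap _
  unfold Spec_group_into_regions_with_gap_merge_py
  cases indices with
  | nil => rfl
  | cons h t =>
    rw [altB_eq]
    simpa [group_into_regions_with_gap_merge_py] using foldA_eq gap t [] h h
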